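-- pv_equiv track=rewrite | github.com/Yifei-ZHAO96/LeetCode | google/2713. Maximum Strictly Increasing Cells in a Matrix.py | maxIncreasingCells
-- ===== SOURCE A (Python) =====
-- from typing import List
-- import collections
--
-- def maxIncreasingCells(M: List[List[int]]) -> int:
--     m, n = len(M), len(M[0])
--     value_loc_map = collections.defaultdict(list)
--     # O(MN) O(MN)
--     for i in range(m):
--         for j in range(n):
--             value_loc_map[M[i][j]].append((i, j))
--
--     row, col = [0] * m, [0] * n
--     # O(MN) O(MN)
--     dp = [[0] * n for _ in range((m))] # dp[i][j] means the maximum steps can go from the first cell.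
--
--     # O(MN logMN) O(MN)
--     for v in sorted(value_loc_map.keys()):
--         for i, j in value_loc_map[v]:
--             dp[i][j] = max(row[i], col[j]) + 1 # M[i][j] is definitely greater than the previous value
--
--         for i, j in value_loc_map[v]:
--             row[i] = max(row[i], dp[i][j]) # update row, col
--             col[j] = max(col[j], dp[i][j])
--
--     return max(row)
-- ===== SOURCE B (Python) =====
-- def maxIncreasingCells(M):
--     m, n = len(M), len(M[0])
--     order = sorted(((M[i][j], i, j) for i in range(m) for j in range(n)),
--                    key=lambda t: t[0])
--     f = {}
--     for v, i, j in order: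
--         best = 0
--         for jj in range(n):
--             if M[i][jj] < v:
--                 best = max(best, f[(i, jj)])
--         for ii in range(m):
--             if M[ii][j] < v:
--                 best = max(best, f[(ii, j)])
--         f[(i, j)] = best + 1
--     return max(f.values(), default=0)
-- ===== Notes on version B (the rewrite author's own statement) =====
-- stated objective: alternative
-- what changed: B evaluates the chain-length recurrence directly per cell (scanning the cell's row and column for strictly smaller, already-solved cells in one value-sorted pass over cells, memo dict keyed by cell), instead of A's value-grouped sweep with a defaultdict of locations, row/col maxima arrays and a dp table.
-- outside the precondition, e.g. on maxIncreasingCells([]): A raises IndexError, B raises IndexError; on maxIncreasingCells([[1, 2], [3]]): A raises IndexError, B raises IndexError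
import Mathlib
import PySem

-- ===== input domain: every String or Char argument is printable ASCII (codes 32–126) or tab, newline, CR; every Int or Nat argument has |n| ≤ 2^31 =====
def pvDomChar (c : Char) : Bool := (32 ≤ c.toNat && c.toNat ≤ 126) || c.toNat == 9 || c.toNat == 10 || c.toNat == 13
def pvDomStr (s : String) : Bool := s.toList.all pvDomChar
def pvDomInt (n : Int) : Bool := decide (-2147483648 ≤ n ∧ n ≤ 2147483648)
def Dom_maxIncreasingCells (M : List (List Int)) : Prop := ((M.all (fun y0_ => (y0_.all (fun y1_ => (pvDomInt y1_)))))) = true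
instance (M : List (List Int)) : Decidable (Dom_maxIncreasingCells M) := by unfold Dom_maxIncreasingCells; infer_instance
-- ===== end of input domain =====

-- B is an alternative evaluation of the same recurrence: one value-sorted pass over cells with a memo dict,
-- scanning each cell's row and column, instead of A's value-grouped sweep with row/col arrays and a dp table.

-- ===== PORT A =====
def maxIncreasingCells (M : List (List Int)) : Int :=
  let m := M.length
  let n := (M.getD 0 []).length
  -- for i in range(m): for j in range(n): value_loc_map[M[i][j]].append((i, j))
  let vlm : PySem.Dict Int (List (Nat × Nat)) :=
    (List.range m).foldl (fun d i =>
      (List.range n).foldl (fun d j =>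
        d.modify ((M.getD i []).getD j 0) [] (· ++ [(i, j)])) d) PySem.Dict.empty
  let row : List Int := List.replicate m 0
  let col : List Int := List.replicate n 0
  let dp : List (List Int) := List.replicate m (List.replicate n 0)
  let st :=
    (PySem.List.sorted vlm.keys (fun v => v) false).foldl
      (fun (st : List Int × List Int × List (List Int)) v =>
        let row := st.1; let col := st.2.1; let dp := st.2.2
        let locs := vlm.getD v []
        let dp := locs.foldl (fun dp c =>
          dp.set c.1 ((dp.getD c.1 []).set c.2 (max (row.getD c.1 0) (col.getD c.2 0) + 1))) dp
        let rc := locs.foldl (fun (rc : List Int × List Int) c =>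
          (rc.1.set c.1 (max (rc.1.getD c.1 0) ((dp.getD c.1 []).getD c.2 0)),
           rc.2.set c.2 (max (rc.2.getD c.2 0) ((dp.getD c.1 []).getD c.2 0)))) (row, col)
        (rc.1, rc.2, dp)) (row, col, dp)
  (PySem.List.max? st.1 (fun x => x)).getD 0    -- max(row); Pre_ gives m ≥ 1

-- ===== PORT B =====
def maxIncreasingCells_alt (M : List (List Int)) : Int :=
  let m := M.length
  let n := (M.getD 0 []).length
  let order : List (Int × Nat × Nat) :=
    PySem.List.sorted
      ((List.range m).flatMap (fun i => (List.range n).map (fun j => ((M.getD i []).getD j 0, i, j))))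
      (fun t => t.1) false
  let f : PySem.Dict (Nat × Nat) Int :=
    order.foldl (fun f t =>
      let v := t.1; let i := t.2.1; let j := t.2.2
      let best := (List.range n).foldl (fun best jj =>
        if (M.getD i []).getD jj 0 < v then max best (f.getD (i, jj) 0) else best) 0
      let best := (List.range m).foldl (fun best ii =>
        if (M.getD ii []).getD j 0 < v then max best (f.getD (ii, j) 0) else best) best
      f.insert (i, j) (best + 1)) PySem.Dict.empty
  (PySem.List.max? f.values (fun x => x)).getD 0   -- max(f.values(), default=0); keys all distinct

-- ===== PRECONDITION & SPEC =====
-- Pre_ excludes exactly the inputs where A raises: M = [] (len(M[0]) IndexError) and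
-- matrices with a row shorter than the first row (M[i][j] IndexError); B raises there too.
def Pre_maxIncreasingCells (M : List (List Int)) : Prop :=
  M ≠ [] ∧ ∀ r ∈ M, (M.getD 0 []).length ≤ r.length
instance (M : List (List Int)) : Decidable (Pre_maxIncreasingCells M) := by
  unfold Pre_maxIncreasingCells; infer_instance

def pvWitness_maxIncreasingCells : List (List Int) := [[3, 1], [2, 4]]

def Spec_maxIncreasingCells (M : List (List Int)) (out : Int) : Prop := out = maxIncreasingCells_alt M
instance (M : List (List Int)) (out : Int) : Decidable (Spec_maxIncreasingCells M out) := by unfold Spec_maxIncreasingCells; infer_instance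

-- ===== CLAIM (what is proved, stated in full; the proofs are below) =====
def Claim_equal_maxIncreasingCells : Prop := ∀ (M : List (List Int)), Dom_maxIncreasingCells M → Pre_maxIncreasingCells M → Spec_maxIncreasingCells M (maxIncreasingCells M)


-- ===== LEMMAS AND PROOFS =====

-- abbreviations for the matrix geometry
def pvN (M : List (List Int)) : Nat := (M.getD 0 []).length
def pvVal (M : List (List Int)) (c : Nat × Nat) : Int := (M.getD c.1 []).getD c.2 0
def pvRowC (M : List (List Int)) (i : Nat) : List (Nat × Nat) := (List.range (pvN M)).map (fun j => (i, j))
def pvColC (M : List (List Int)) (j : Nat) : List (Nat × Nat) := (List.range M.length).map (fun i => (i, j))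
def pvCells (M : List (List Int)) : List (Nat × Nat) := (List.range M.length).flatMap (fun i => pvRowC M i)
def pvLM (l : List Int) : Int := l.foldl max 0

theorem pv_mem_cells {M : List (List Int)} {c : Nat × Nat} :
    c ∈ pvCells M ↔ c.1 < M.length ∧ c.2 < pvN M := by
  obtain ⟨i, j⟩ := c
  constructor
  · intro h
    obtain ⟨a, ha, hc⟩ := List.mem_flatMap.mp h
    obtain ⟨b, hb, hab⟩ := List.mem_map.mp hc
    obtain ⟨rfl, rfl⟩ := Prod.mk.injEq .. |>.mp hab.symm
    exact ⟨List.mem_range.mp ha, List.mem_range.mp hb⟩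
  · intro ⟨h1, h2⟩
    exact List.mem_flatMap.mpr ⟨i, List.mem_range.mpr h1,
      List.mem_map.mpr ⟨j, List.mem_range.mpr h2, rfl⟩⟩

theorem pv_cells_nodup (M : List (List Int)) : (pvCells M).Nodup := by
  rw [pvCells, List.nodup_flatMap]
  constructor
  · intro i _
    exact (List.nodup_range).map (fun a b h => by simpa using congrArg Prod.snd h)
  · refine (List.nodup_range).pairwise_of_forall_ne ?_
    intro a b _ _ hab
    simp only [Function.onFun, List.disjoint_left, pvRowC, List.mem_map, List.mem_range]
    rintro x ⟨j, _, rfl⟩ ⟨j', _, h⟩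
    exact hab (by simpa using (congrArg Prod.fst h).symm)

theorem pv_measure_lt {M : List (List Int)} {a b : Nat × Nat}
    (ha : a ∈ pvCells M) (h : pvVal M a < pvVal M b) :
    ((pvCells M).filter (fun c' => decide (pvVal M c' < pvVal M a))).length <
    ((pvCells M).filter (fun c' => decide (pvVal M c' < pvVal M b))).length := by
  have hsub : (pvCells M).filter (fun c' => decide (pvVal M c' < pvVal M a)) =
      ((pvCells M).filter (fun c' => decide (pvVal M c' < pvVal M b))).filter
        (fun c' => decide (pvVal M c' < pvVal M a)) := by
    rw [List.filter_filter]
    apply List.filter_congr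
    intro x _
    by_cases hx : pvVal M x < pvVal M a
    · simp [hx, lt_trans hx h]
    · simp [hx]
  rw [hsub]
  apply List.length_filter_lt_length_iff_exists.mpr
  exact ⟨a, List.mem_filter.mpr ⟨ha, by simpa using h⟩, by simp⟩

-- the common recurrence: longest strictly-increasing chain (row/column moves) ENDING at c
def pvF (M : List (List Int)) (c : Nat × Nat) : Int :=
  if h : c ∈ pvCells M then
    1 + max
      (pvLM ((((pvRowC M c.1).filter (fun c' => decide (pvVal M c' < pvVal M c))).attach).map
        (fun x => pvF M x.1)))
      (pvLM ((((pvColC M c.2).filter (fun c' => decide (pvVal M c' < pvVal M c))).attach).map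
        (fun x => pvF M x.1)))
  else 0
termination_by ((pvCells M).filter (fun c' => decide (pvVal M c' < pvVal M c))).length
decreasing_by
  · rcases List.mem_filter.mp x.2 with ⟨hrow, hlt⟩
    apply pv_measure_lt _ (by simpa using hlt)
    rcases List.mem_map.mp hrow with ⟨j, hj, hx⟩
    rw [← hx]
    exact pv_mem_cells.mpr ⟨(pv_mem_cells.mp h).1, by simpa using List.mem_range.mp hj⟩
  · rcases List.mem_filter.mp x.2 with ⟨hcol, hlt⟩
    apply pv_measure_lt _ (by simpa using hlt)
    rcases List.mem_map.mp hcol with ⟨i, hi, hx⟩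
    rw [← hx]
    exact pv_mem_cells.mpr ⟨by simpa using List.mem_range.mp hi, (pv_mem_cells.mp h).2⟩

theorem pvF_eq {M : List (List Int)} {c : Nat × Nat} (h : c ∈ pvCells M) :
    pvF M c =
      1 + max
        (pvLM (((pvRowC M c.1).filter (fun c' => decide (pvVal M c' < pvVal M c))).map (pvF M)))
        (pvLM (((pvColC M c.2).filter (fun c' => decide (pvVal M c' < pvVal M c))).map (pvF M))) := by
  rw [pvF, dif_pos h]
  simp only [List.attach_map_val]

theorem pvF_of_not_mem {M : List (List Int)} {c : Nat × Nat} (h : c ∉ pvCells M) : pvF M c = 0 := by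
  rw [pvF, dif_neg h]

-- small max-fold algebra
theorem pv_foldl_max_init (l : List Int) : ∀ a b : Int, l.foldl max (max a b) = max a (l.foldl max b) := by
  induction l with
  | nil => intro a b; rfl
  | cons x t ih =>
    intro a b
    simpa [List.foldl_cons, max_assoc] using ih a (max b x)

theorem pvLM_nonneg (l : List Int) : 0 ≤ pvLM l := (PySem.List.le_foldl_max l 0).1

theorem pv_foldl_max_eq (l : List Int) (a : Int) (ha : 0 ≤ a) : l.foldl max a = max a (pvLM l) := by
  have := pv_foldl_max_init l a 0
  rwa [max_eq_left ha] at this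

theorem pvLM_append (l1 l2 : List Int) : pvLM (l1 ++ l2) = max (pvLM l1) (pvLM l2) := by
  have h := pv_foldl_max_eq l2 (pvLM l1) (pvLM_nonneg l1)
  rw [pvLM, List.foldl_append]
  exact h

theorem pvLM_perm {l1 l2 : List Int} (h : l1.Perm l2) : pvLM l1 = pvLM l2 :=
  List.Perm.foldl_op_eq h

theorem pvLM_cons (a : Int) (l : List Int) (ha : 0 ≤ a) : pvLM (a :: l) = max a (pvLM l) := by
  have h := pv_foldl_max_eq l (max 0 a) (le_max_left 0 a)
  rw [pvLM, List.foldl_cons]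
  rw [h, max_eq_right ha]

theorem pvLM_eq_zero {l : List Int} (h : ∀ x ∈ l, x = 0) : pvLM l = 0 := by
  rcases PySem.List.foldl_max_mem l 0 with h0 | hm
  · exact h0
  · exact h _ hm

theorem pvF_nonneg (M : List (List Int)) (c : Nat × Nat) : 0 ≤ pvF M c := by
  by_cases h : c ∈ pvCells M
  · rw [pvF_eq h]
    have := pvLM_nonneg (((pvRowC M c.1).filter (fun c' => decide (pvVal M c' < pvVal M c))).map (pvF M))
    omega
  · rw [pvF_of_not_mem h]

theorem pv_maxD_eq_pvLM (l : List Int) (h : ∀ x ∈ l, 0 ≤ x) :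
    (PySem.List.max? l (fun x => x)).getD 0 = pvLM l := by
  cases hm : PySem.List.max? l (fun x => x) with
  | none =>
    rw [PySem.List.max?_eq_none_iff] at hm
    subst hm; rfl
  | some x =>
    have hxl := PySem.List.max?_mem hm
    have hmax := PySem.List.max?_isMax hm
    have h1 : x ≤ pvLM l := (PySem.List.le_foldl_max l 0).2 _ hxl
    have h2 : pvLM l ≤ x := by
      rcases PySem.List.foldl_max_mem l 0 with h0 | hm2
      · rw [pvLM, h0]; exact h _ hxl
      · exact hmax _ hm2
    simpa using le_antisymm h1 h2

-- generic fold shapes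
theorem pv_filter_perm_split {α : Type} (l : List α) (p q r : α → Bool)
    (h : ∀ x ∈ l, p x = (q x || r x)) (hd : ∀ x ∈ l, ¬(q x = true ∧ r x = true)) :
    (l.filter p).Perm (l.filter q ++ l.filter r) := by
  induction l with
  | nil => simp
  | cons x t ih =>
    have ih' := ih (fun y hy => h y (by simp [hy])) (fun y hy => hd y (by simp [hy]))
    have hx := h x (by simp)
    by_cases hq : q x = true
    · have hr : r x = false := by
        rcases Bool.eq_false_or_eq_true (r x) with h1 | h1
        · exact absurd ⟨hq, h1⟩ (hd x (by simp))
        · exact h1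
      simp only [List.filter_cons, hx, hq, hr, Bool.true_or, if_true, Bool.false_eq_true, if_false]
      simpa using ih'.cons x
    · have hq' : q x = false := by simpa using hq
      by_cases hr : r x = true
      · simp only [List.filter_cons, hx, hq', hr, Bool.or_true, if_true, Bool.false_eq_true, if_false]
        exact (ih'.cons x).trans (List.perm_middle.symm)
      · have hr' : r x = false := by simpa using hr
        simp only [List.filter_cons, hx, hq', hr', Bool.or_self, Bool.false_eq_true, if_false]
        exact ih'

theorem pv_getD_set_self (l : List Int) (k : Nat) (h : k < l.length) (a d : Int) :
    (l.set k a).getD k d = a := by simp [List.getD, h]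

theorem pv_getD_set_ne (l : List Int) (k i : Nat) (h : k ≠ i) (a d : Int) :
    (l.set k a).getD i d = l.getD i d := by simp [List.getD, h]

theorem pv_getD2_set_self (l : List (List Int)) (k : Nat) (h : k < l.length) (a : List Int) :
    (l.set k a).getD k [] = a := by simp [List.getD, h]

theorem pv_getD2_set_ne (l : List (List Int)) (k i : Nat) (h : k ≠ i) (a : List Int) :
    (l.set k a).getD i [] = l.getD i [] := by simp [List.getD, h]


-- Prop-test fold-max shape (matches the ports' `if _ < _ then max _ _ else _` loops)
theorem pv_foldl_ifmax_p {α : Type} (l : List α) (p : α → Prop) [DecidablePred p] (g : α → Int) :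
    ∀ a : Int, l.foldl (fun acc x => if p x then max acc (g x) else acc) a =
      ((l.filter (fun x => decide (p x))).map g).foldl max a := by
  induction l with
  | nil => intro a; rfl
  | cons x t ih =>
    intro a
    by_cases hx : p x <;> simp [List.foldl_cons, hx, ih]

theorem pv_filter_map {α β : Type} (l : List α) (f : α → β) (p : β → Bool) :
    (l.map f).filter p = (l.filter (fun x => p (f x))).map f := by
  simp [List.filter_map]; rfl

theorem pv_getD_replicate (m : Nat) (i : Nat) : (List.replicate m (0 : Int)).getD i 0 = 0 := by
  rcases lt_or_ge i m with h | h
  · simp [List.getD, List.getElem?_replicate, h]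
  · have : (List.replicate m (0 : Int))[i]? = none := by
      rw [List.getElem?_eq_none_iff]
      simpa using h
    simp [List.getD, this]

theorem pvLM_flatMap {α : Type} (l : List α) (g : α → List Int) :
    pvLM (l.flatMap g) = pvLM (l.map (fun x => pvLM (g x))) := by
  induction l with
  | nil => rfl
  | cons x t ih =>
    rw [List.flatMap_cons, pvLM_append, List.map_cons, pvLM_cons _ _ (pvLM_nonneg _), ih]

theorem pv_filter_flatMap {α β : Type} (l : List α) (g : α → List β) (p : β → Bool) :
    (l.flatMap g).filter p = l.flatMap (fun x => (g x).filter p) := by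
  induction l with
  | nil => rfl
  | cons x t ih => rw [List.flatMap_cons, List.filter_append, ih, List.flatMap_cons]

theorem pv_flatMap_nil {α β : Type} [DecidableEq α] (l : List α) (i : α) (X : List β)
    (h : ∀ x ∈ l, x ≠ i) : (l.flatMap (fun x => if x = i then X else [])) = [] := by
  induction l with
  | nil => rfl
  | cons x t ih =>
    rw [List.flatMap_cons, if_neg (h x (by simp)), List.nil_append]
    exact ih (fun y hy => h y (by simp [hy]))

theorem pv_flatMap_eq_single {α β : Type} [DecidableEq α] (l : List α) (i : α) (X : List β)
    (hnd : l.Nodup) (hmem : i ∈ l) : (l.flatMap (fun x => if x = i then X else [])) = X := by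
  induction l with
  | nil => simp at hmem
  | cons x t ih =>
    rw [List.flatMap_cons]
    rcases List.mem_cons.mp hmem with h1 | hmem'
    · subst h1
      rw [if_pos rfl, pv_flatMap_nil t i X (fun y hy hxy => (List.nodup_cons.mp hnd).1 (hxy ▸ hy)),
        List.append_nil]
    · have hx : x ≠ i := fun hxi => (List.nodup_cons.mp hnd).1 (hxi ▸ hmem')
      rw [if_neg hx, List.nil_append]
      exact ih (List.nodup_cons.mp hnd).2 hmem'

theorem pv_flatMap_if {α β : Type} (l : List α) (q : α → Bool) (f : α → β) :
    (l.flatMap (fun x => if q x then [f x] else [])) = (l.filter q).map f := by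
  induction l with
  | nil => rfl
  | cons x t ih =>
    rw [List.flatMap_cons, List.filter_cons, ih]
    by_cases hq : q x <;> simp [hq]

theorem pv_range_filter (n j : Nat) (q : Nat → Bool) (hj : j < n) :
    (List.range n).filter (fun x => x == j && q x) = if q j then [j] else [] := by
  induction n with
  | zero => omega
  | succ n ihn =>
    rw [List.range_succ, List.filter_append]
    rcases lt_or_ge j n with h | h
    · rw [ihn h]
      have : [n].filter (fun x => x == j && q x) = [] := by
        simp [List.filter_cons, show (n == j) = false by simp; omega]
      rw [this, List.append_nil]
    · have hjn : j = n := by omega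
      subst hjn
      have h1 : (List.range j).filter (fun x => x == j && q x) = [] := by
        rw [List.filter_eq_nil_iff]
        intro x hx
        have := List.mem_range.mp hx
        simp [show (x == j) = false by simp; omega]
      rw [h1, List.nil_append]
      by_cases hq : q j <;> simp [List.filter_cons, hq]

theorem pv_cells_filter_row (M : List (List Int)) (p : Nat × Nat → Bool) (i : Nat)
    (hi : i < M.length) :
    (pvCells M).filter (fun c => c.1 == i && p c) = (pvRowC M i).filter p := by
  rw [pvCells, pv_filter_flatMap]
  have inner : ∀ i' : Nat, (pvRowC M i').filter (fun c => c.1 == i && p c) =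
      if i' = i then (pvRowC M i).filter p else [] := by
    intro i'
    by_cases hx : i' = i
    · subst hx
      rw [if_pos rfl, pvRowC, pv_filter_map, pv_filter_map]
      simp
    · rw [if_neg hx, pvRowC, pv_filter_map, List.filter_eq_nil_iff.mpr (by intro j _; simp [hx])]
      simp
  simp only [inner]
  exact pv_flatMap_eq_single _ i _ List.nodup_range (List.mem_range.mpr hi)

theorem pv_cells_filter_col (M : List (List Int)) (p : Nat × Nat → Bool) (j : Nat)
    (hj : j < pvN M) :
    (pvCells M).filter (fun c => c.2 == j && p c) = (pvColC M j).filter p := by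
  rw [pvCells, pv_filter_flatMap]
  have inner : ∀ i' : Nat, (pvRowC M i').filter (fun c => c.2 == j && p c) =
      if p (i', j) then [(i', j)] else [] := by
    intro i'
    rw [pvRowC, pv_filter_map]
    have : (fun jj : Nat => ((i', jj).2 == j && p (i', jj))) = (fun jj => jj == j && p (i', jj)) := rfl
    rw [this, pv_range_filter _ _ _ hj]
    by_cases hp : p (i', j) <;> simp [hp]
  simp only [inner]
  rw [pv_flatMap_if, pvColC, pv_filter_map]

-- phase 1 of A's sweep: writing dp[i][j] at pairwise-distinct cells
theorem pv_phase1_untouched (g : Nat × Nat → Int) :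
    ∀ (locs : List (Nat × Nat)) (dp : List (List Int)) (c : Nat × Nat),
      (∀ c' ∈ locs, c' ≠ c) → (∀ c' ∈ locs, c'.1 < dp.length) →
      (((locs.foldl (fun dp c => dp.set c.1 ((dp.getD c.1 []).set c.2 (g c))) dp).getD c.1 []).getD c.2 0)
        = ((dp.getD c.1 []).getD c.2 0) := by
  intro locs
  induction locs with
  | nil => intro dp c _ _; rfl
  | cons c0 t ih =>
    intro dp c hne hb
    rw [List.foldl_cons]
    have hstep : (((dp.set c0.1 ((dp.getD c0.1 []).set c0.2 (g c0))).getD c.1 []).getD c.2 0)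
        = ((dp.getD c.1 []).getD c.2 0) := by
      by_cases h1 : c0.1 = c.1
      · rw [h1, pv_getD2_set_self _ _ (h1 ▸ hb c0 (by simp)) _]
        have h2 : c0.2 ≠ c.2 := by
          intro h2
          exact hne c0 (by simp) (Prod.ext h1 h2)
        exact pv_getD_set_ne _ _ _ h2 _ _
      · rw [pv_getD2_set_ne _ _ _ h1]
    rw [← hstep]
    exact ih _ c (fun c' hc' => hne c' (by simp [hc'])) (by simpa using fun c' hc' => hb c' (by simp [hc']))

theorem pv_phase1 (M : List (List Int)) (g : Nat × Nat → Int) :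
    ∀ (locs : List (Nat × Nat)) (dp : List (List Int)),
      locs.Nodup → (∀ c ∈ locs, c.1 < dp.length ∧ c.2 < pvN M) → (∀ r ∈ dp, r.length = pvN M) →
      (∀ c ∈ locs,
        (((locs.foldl (fun dp c => dp.set c.1 ((dp.getD c.1 []).set c.2 (g c))) dp).getD c.1 []).getD c.2 0) = g c) ∧
      (locs.foldl (fun dp c => dp.set c.1 ((dp.getD c.1 []).set c.2 (g c))) dp).length = dp.length ∧
      (∀ r ∈ (locs.foldl (fun dp c => dp.set c.1 ((dp.getD c.1 []).set c.2 (g c))) dp), r.length = pvN M) := by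
  intro locs
  induction locs with
  | nil => intro dp _ _ hr; exact ⟨by simp, rfl, hr⟩
  | cons c0 t ih =>
    intro dp hnd hb hr
    have hb0 := hb c0 (by simp)
    have hrow0 : (dp.getD c0.1 []).length = pvN M := by
      have : dp.getD c0.1 [] ∈ dp := by
        have := List.getD_eq_getElem dp [] hb0.1
        rw [this]
        exact List.getElem_mem _
      exact hr _ this
    have hlen1 : (dp.set c0.1 ((dp.getD c0.1 []).set c0.2 (g c0))).length = dp.length := by
      simp
    have hr1 : ∀ r ∈ (dp.set c0.1 ((dp.getD c0.1 []).set c0.2 (g c0))), r.length = pvN M := by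
      intro r hmem
      rcases List.mem_or_eq_of_mem_set hmem with h | h
      · exact hr _ h
      · rw [h]; simpa using hrow0
    have ihres := ih (dp.set c0.1 ((dp.getD c0.1 []).set c0.2 (g c0)))
      (List.nodup_cons.mp hnd).2
      (by rw [hlen1]; exact fun c hc => hb c (by simp [hc])) hr1
    rw [List.foldl_cons]
    refine ⟨?_, by rw [ihres.2.1, hlen1], ihres.2.2⟩
    intro c hc
    rcases List.mem_cons.mp hc with h | h
    · subst h
      have huntouched := pv_phase1_untouched g t (dp.set c.1 ((dp.getD c.1 []).set c.2 (g c))) c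
        (fun c' hc' hc'c => (List.nodup_cons.mp hnd).1 (hc'c ▸ hc'))
        (by rw [hlen1]; exact fun c' hc' => (hb c' (by simp [hc'])).1)
      rw [huntouched, pv_getD2_set_self _ _ hb0.1, pv_getD_set_self _ _ (by rw [hrow0]; exact hb0.2)]
    · exact ihres.1 c h

-- phase 2 of A's sweep: running max updates of row/col
theorem pv_phase2 (g : Nat × Nat → Int) :
    ∀ (locs : List (Nat × Nat)) (row col : List Int),
      (∀ c ∈ locs, c.1 < row.length ∧ c.2 < col.length) →
      (∀ i : Nat,
        (locs.foldl (fun rc (c : Nat × Nat) =>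
          (rc.1.set c.1 (max (rc.1.getD c.1 0) (g c)), rc.2.set c.2 (max (rc.2.getD c.2 0) (g c)))) (row, col)).1.getD i 0
        = ((locs.filter (fun c => c.1 == i)).map g).foldl max (row.getD i 0)) ∧
      (∀ j : Nat,
        (locs.foldl (fun rc (c : Nat × Nat) =>
          (rc.1.set c.1 (max (rc.1.getD c.1 0) (g c)), rc.2.set c.2 (max (rc.2.getD c.2 0) (g c)))) (row, col)).2.getD j 0
        = ((locs.filter (fun c => c.2 == j)).map g).foldl max (col.getD j 0)) := by
  intro locs
  induction locs with
  | nil => intro row col _; exact ⟨fun i => rfl, fun j => rfl⟩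
  | cons c0 t ih =>
    intro row col hb
    have hb0 := hb c0 (by simp)
    have ihres := ih (row.set c0.1 (max (row.getD c0.1 0) (g c0))) (col.set c0.2 (max (col.getD c0.2 0) (g c0)))
      (by simpa using fun c hc => hb c (by simp [hc]))
    rw [List.foldl_cons]
    constructor
    · intro i
      rw [ihres.1 i, List.filter_cons]
      by_cases h : c0.1 = i
      · subst h
        rw [pv_getD_set_self _ _ hb0.1]
        simp [List.foldl_cons]
      · rw [pv_getD_set_ne _ _ _ h]
        simp [h]
    · intro j
      rw [ihres.2 j, List.filter_cons]
      by_cases h : c0.2 = j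
      · subst h
        rw [pv_getD_set_self _ _ hb0.2]
        simp [List.foldl_cons]
      · rw [pv_getD_set_ne _ _ _ h]
        simp [h]

theorem pv_phase2_len (g : Nat × Nat → Int) :
    ∀ (locs : List (Nat × Nat)) (row col : List Int),
      (locs.foldl (fun rc (c : Nat × Nat) =>
        (rc.1.set c.1 (max (rc.1.getD c.1 0) (g c)), rc.2.set c.2 (max (rc.2.getD c.2 0) (g c)))) (row, col)).1.length = row.length ∧
      (locs.foldl (fun rc (c : Nat × Nat) =>
        (rc.1.set c.1 (max (rc.1.getD c.1 0) (g c)), rc.2.set c.2 (max (rc.2.getD c.2 0) (g c)))) (row, col)).2.length = col.length := by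
  intro locs
  induction locs with
  | nil => intro row col; exact ⟨rfl, rfl⟩
  | cons c0 t ih =>
    intro row col
    rw [List.foldl_cons]
    have := ih (row.set c0.1 (max (row.getD c0.1 0) (g c0))) (col.set c0.2 (max (col.getD c0.2 0) (g c0)))
    simpa using this

-- the location map A builds
def pvLocs (M : List (List Int)) (v : Int) : List (Nat × Nat) :=
  (pvCells M).filter (fun c => pvVal M c == v)

theorem pv_dict_flat (M : List (List Int)) :
    ((List.range M.length).foldl (fun d i =>
      (List.range (pvN M)).foldl (fun d j =>
        d.modify ((M.getD i []).getD j 0) [] (· ++ [(i, j)])) d) PySem.Dict.empty)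
    = ((pvCells M).map (fun c => (pvVal M c, c))).foldl
        (fun d p => d.modify p.1 [] (· ++ [p.2])) PySem.Dict.empty := by
  rw [pvCells]
  simp only [List.map_flatMap, pvRowC, List.map_map, List.foldl_flatMap, List.foldl_map]
  rfl

theorem pv_dict_getD (M : List (List Int)) (v : Int) :
    (((pvCells M).map (fun c => (pvVal M c, c))).foldl
      (fun d p => d.modify p.1 [] (· ++ [p.2])) PySem.Dict.empty).getD v [] = pvLocs M v := by
  rw [PySem.Dict.getD_foldl_modify_append, PySem.Dict.getD_empty, List.nil_append, pvLocs,
    pv_filter_map, List.map_map]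
  have : ((fun x : Int × (Nat × Nat) => x.2) ∘ fun c : Nat × Nat => (pvVal M c, c)) = id := rfl
  rw [this, List.map_id]

theorem pv_dict_keys (M : List (List Int)) :
    (((pvCells M).map (fun c => (pvVal M c, c))).foldl
      (fun d p => d.modify p.1 [] (· ++ [p.2])) PySem.Dict.empty).keys
    = PySem.Set.ofList ((pvCells M).map (pvVal M)) := by
  have h := PySem.Dict.keys_foldl_modify_key (l := (pvCells M).map (fun c => (pvVal M c, c)))
    (key := fun p => p.1) (d0 := ([] : List (Nat × Nat))) (f := fun _ p => (· ++ [p.2]))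
    (d := PySem.Dict.empty)
  rw [h, PySem.Dict.keys_empty, List.map_map]
  rfl

-- A's per-value step, as applied to the location lists
def pvAstep (M : List (List Int)) (st : List Int × List Int × List (List Int)) (v : Int) :
    List Int × List Int × List (List Int) :=
  let row := st.1; let col := st.2.1; let dp := st.2.2
  let locs := pvLocs M v
  let dp := locs.foldl (fun dp c =>
    dp.set c.1 ((dp.getD c.1 []).set c.2 (max (row.getD c.1 0) (col.getD c.2 0) + 1))) dp
  let rc := locs.foldl (fun (rc : List Int × List Int) c =>
    (rc.1.set c.1 (max (rc.1.getD c.1 0) ((dp.getD c.1 []).getD c.2 0)),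
     rc.2.set c.2 (max (rc.2.getD c.2 0) ((dp.getD c.1 []).getD c.2 0)))) (row, col)
  (rc.1, rc.2, dp)

def pvRInv (M : List (List Int)) (S : List Int) (row : List Int) : Prop :=
  ∀ i, row.getD i 0 = pvLM (((pvRowC M i).filter (fun c => decide (pvVal M c ∉ S))).map (pvF M))
def pvCInv (M : List (List Int)) (S : List Int) (col : List Int) : Prop :=
  ∀ j, col.getD j 0 = pvLM (((pvColC M j).filter (fun c => decide (pvVal M c ∉ S))).map (pvF M))

theorem pv_rowC_subset {M : List (List Int)} {i : Nat} (hi : i < M.length) :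
    ∀ c ∈ pvRowC M i, c ∈ pvCells M := by
  intro c hc
  obtain ⟨j, hj, hcj⟩ := List.mem_map.mp hc
  rw [← hcj]
  exact pv_mem_cells.mpr ⟨hi, List.mem_range.mp hj⟩

theorem pv_colC_subset {M : List (List Int)} {j : Nat} (hj : j < pvN M) :
    ∀ c ∈ pvColC M j, c ∈ pvCells M := by
  intro c hc
  obtain ⟨i, hi, hci⟩ := List.mem_map.mp hc
  rw [← hci]
  exact pv_mem_cells.mpr ⟨List.mem_range.mp hi, hj⟩

theorem pv_rowC_fst {M : List (List Int)} {i : Nat} : ∀ c ∈ pvRowC M i, c.1 = i := by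
  intro c hc
  obtain ⟨j, _, hcj⟩ := List.mem_map.mp hc
  rw [← hcj]

theorem pv_colC_snd {M : List (List Int)} {j : Nat} : ∀ c ∈ pvColC M j, c.2 = j := by
  intro c hc
  obtain ⟨i, _, hci⟩ := List.mem_map.mp hc
  rw [← hci]

theorem pv_row_zero {M : List (List Int)} {i : Nat} (hi : ¬ i < M.length) (p : Nat × Nat → Bool) :
    pvLM (((pvRowC M i).filter p).map (pvF M)) = 0 := by
  apply pvLM_eq_zero
  intro x hx
  obtain ⟨c, hc, hcx⟩ := List.mem_map.mp hx
  rw [← hcx]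
  apply pvF_of_not_mem
  intro hmem
  exact hi (pv_rowC_fst c (List.mem_filter.mp hc).1 ▸ (pv_mem_cells.mp hmem).1)

theorem pv_col_zero {M : List (List Int)} {j : Nat} (hj : ¬ j < pvN M) (p : Nat × Nat → Bool) :
    pvLM (((pvColC M j).filter p).map (pvF M)) = 0 := by
  apply pvLM_eq_zero
  intro x hx
  obtain ⟨c, hc, hcx⟩ := List.mem_map.mp hx
  rw [← hcx]
  apply pvF_of_not_mem
  intro hmem
  exact hj (pv_colC_snd c (List.mem_filter.mp hc).1 ▸ (pv_mem_cells.mp hmem).2)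

theorem pv_pred_lt {M : List (List Int)} {v : Int} {S' : List Int}
    (hPW : (v :: S').Pairwise (· < ·))
    (hComp : ∀ c ∈ pvCells M, pvVal M c ∉ (v :: S') → ∀ w ∈ v :: S', pvVal M c < w)
    {c : Nat × Nat} (hc : c ∈ pvCells M) :
    decide (pvVal M c ∉ (v :: S')) = decide (pvVal M c < v) := by
  have hvS : ∀ w ∈ S', v < w := (List.pairwise_cons.mp hPW).1
  apply decide_eq_decide.mpr
  constructor
  · intro h
    exact hComp c hc h v (by simp)
  · intro h hmem
    rcases List.mem_cons.mp hmem with h1 | h1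
    · exact absurd (h1 ▸ h) (lt_irrefl v)
    · exact absurd h (not_lt.mpr (le_of_lt (hvS _ h1)))

theorem pv_pred_split {M : List (List Int)} {v : Int} {S' : List Int}
    (hPW : (v :: S').Pairwise (· < ·))
    (hComp : ∀ c ∈ pvCells M, pvVal M c ∉ (v :: S') → ∀ w ∈ v :: S', pvVal M c < w)
    {c : Nat × Nat} (hc : c ∈ pvCells M) :
    decide (pvVal M c ∉ S') = (decide (pvVal M c < v) || (pvVal M c == v)) := by
  have hvS : ∀ w ∈ S', v < w := (List.pairwise_cons.mp hPW).1
  rcases Bool.eq_false_or_eq_true (pvVal M c == v) with hv | hv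
  · have hveq : pvVal M c = v := by simpa using hv
    rw [hv, Bool.or_true]
    apply decide_eq_true
    intro h1
    exact absurd (hveq ▸ hvS _ h1) (lt_irrefl v)
  · have hne : pvVal M c ≠ v := by simpa using hv
    rw [hv, Bool.or_false]
    apply decide_eq_decide.mpr
    constructor
    · intro h
      exact hComp c hc (by simp [hne, h]) v (by simp)
    · intro h h1
      exact absurd h (not_lt.mpr (le_of_lt (hvS _ h1)))

theorem pv_split_max {M : List (List Int)} {v : Int} {S' : List Int} (l : List (Nat × Nat))
    (hsub : ∀ c ∈ l, c ∈ pvCells M)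
    (hPW : (v :: S').Pairwise (· < ·))
    (hComp : ∀ c ∈ pvCells M, pvVal M c ∉ (v :: S') → ∀ w ∈ v :: S', pvVal M c < w) :
    pvLM ((l.filter (fun c => decide (pvVal M c ∉ S'))).map (pvF M)) =
      max (pvLM ((l.filter (fun c => decide (pvVal M c < v))).map (pvF M)))
          (pvLM ((l.filter (fun c => pvVal M c == v)).map (pvF M))) := by
  have hperm := pv_filter_perm_split l (fun c => decide (pvVal M c ∉ S'))
    (fun c => decide (pvVal M c < v)) (fun c => pvVal M c == v)
    (fun c hc => pv_pred_split hPW hComp (hsub c hc))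
    (by
      intro c _ ⟨h1, h2⟩
      have h1' : pvVal M c < v := by simpa using h1
      have h2' : pvVal M c = v := by simpa using h2
      omega)
  rw [pvLM_perm (hperm.map (pvF M)), List.map_append, pvLM_append]

theorem pv_Astep (M : List (List Int)) (v : Int) (S' : List Int) (row col : List Int)
    (dp : List (List Int))
    (hPW : (v :: S').Pairwise (· < ·))
    (hComp : ∀ c ∈ pvCells M, pvVal M c ∉ (v :: S') → ∀ w ∈ v :: S', pvVal M c < w)
    (hrl : row.length = M.length) (hcl : col.length = pvN M)
    (hdl : dp.length = M.length) (hdr : ∀ r ∈ dp, r.length = pvN M)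
    (hRow : pvRInv M (v :: S') row) (hCol : pvCInv M (v :: S') col) :
    pvRInv M S' (pvAstep M (row, col, dp) v).1 ∧
    pvCInv M S' (pvAstep M (row, col, dp) v).2.1 ∧
    (pvAstep M (row, col, dp) v).1.length = M.length ∧
    (pvAstep M (row, col, dp) v).2.1.length = pvN M ∧
    (pvAstep M (row, col, dp) v).2.2.length = M.length ∧
    (∀ r ∈ (pvAstep M (row, col, dp) v).2.2, r.length = pvN M) := by
  simp only [pvAstep]
  have hsub : ∀ c ∈ pvLocs M v, c ∈ pvCells M := fun c hc => (List.mem_filter.mp hc).1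
  have hval : ∀ c ∈ pvLocs M v, pvVal M c = v := fun c hc => by
    simpa using (List.mem_filter.mp hc).2
  have hnd : (pvLocs M v).Nodup := (pv_cells_nodup M).filter _
  have hb1 : ∀ c ∈ pvLocs M v, c.1 < dp.length ∧ c.2 < pvN M := fun c hc =>
    ⟨hdl ▸ (pv_mem_cells.mp (hsub c hc)).1, (pv_mem_cells.mp (hsub c hc)).2⟩
  obtain ⟨hP1, hP1len, hP1rows⟩ :=
    pv_phase1 M (fun c => max (row.getD c.1 0) (col.getD c.2 0) + 1) (pvLocs M v) dp hnd hb1 hdr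
  have hXF : ∀ c ∈ pvLocs M v, max (row.getD c.1 0) (col.getD c.2 0) + 1 = pvF M c := by
    intro c hc
    have hcc := hsub c hc
    have hc1 : c.1 < M.length := (pv_mem_cells.mp hcc).1
    have hc2 : c.2 < pvN M := (pv_mem_cells.mp hcc).2
    have hrEq : row.getD c.1 0 =
        pvLM (((pvRowC M c.1).filter (fun c' => decide (pvVal M c' < v))).map (pvF M)) := by
      rw [hRow c.1]
      have : (pvRowC M c.1).filter (fun c' => decide (pvVal M c' ∉ (v :: S'))) =
          (pvRowC M c.1).filter (fun c' => decide (pvVal M c' < v)) :=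
        List.filter_congr (fun c' hc' => pv_pred_lt hPW hComp (pv_rowC_subset hc1 c' hc'))
      rw [this]
    have hcEq : col.getD c.2 0 =
        pvLM (((pvColC M c.2).filter (fun c' => decide (pvVal M c' < v))).map (pvF M)) := by
      rw [hCol c.2]
      have : (pvColC M c.2).filter (fun c' => decide (pvVal M c' ∉ (v :: S'))) =
          (pvColC M c.2).filter (fun c' => decide (pvVal M c' < v)) :=
        List.filter_congr (fun c' hc' => pv_pred_lt hPW hComp (pv_colC_subset hc2 c' hc'))
      rw [this]
    rw [hrEq, hcEq, pvF_eq hcc, hval c hc]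
    omega
  have hb2 : ∀ c ∈ pvLocs M v, c.1 < row.length ∧ c.2 < col.length := fun c hc =>
    ⟨hrl ▸ (pv_mem_cells.mp (hsub c hc)).1, hcl ▸ (pv_mem_cells.mp (hsub c hc)).2⟩
  obtain ⟨hP2r, hP2c⟩ := pv_phase2
    (fun c => (((pvLocs M v).foldl (fun dp c =>
      dp.set c.1 ((dp.getD c.1 []).set c.2 (max (row.getD c.1 0) (col.getD c.2 0) + 1))) dp).getD c.1 []).getD c.2 0)
    (pvLocs M v) row col hb2
  obtain ⟨hL2r, hL2c⟩ := pv_phase2_len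
    (fun c => (((pvLocs M v).foldl (fun dp c =>
      dp.set c.1 ((dp.getD c.1 []).set c.2 (max (row.getD c.1 0) (col.getD c.2 0) + 1))) dp).getD c.1 []).getD c.2 0)
    (pvLocs M v) row col
  have hmap : ∀ q : Nat × Nat → Bool,
      (((pvLocs M v).filter q).map (fun c => (((pvLocs M v).foldl (fun dp c =>
        dp.set c.1 ((dp.getD c.1 []).set c.2 (max (row.getD c.1 0) (col.getD c.2 0) + 1))) dp).getD c.1 []).getD c.2 0))
      = (((pvLocs M v).filter q).map (pvF M)) := by
    intro q
    apply List.map_congr_left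
    intro c hc
    have hcl' := List.mem_of_mem_filter hc
    rw [hP1 c hcl']
    exact hXF c hcl'
  refine ⟨?_, ?_, by rw [hL2r, hrl], by rw [hL2c, hcl], by rw [hP1len, hdl], hP1rows⟩
  · intro i
    rw [hP2r i, hmap]
    by_cases hi : i < M.length
    · have hfilter : (pvLocs M v).filter (fun c => c.1 == i) =
          (pvRowC M i).filter (fun c => pvVal M c == v) := by
        rw [pvLocs, List.filter_filter, ← pv_cells_filter_row M (fun c => pvVal M c == v) i hi]
      rw [hfilter, pv_foldl_max_eq _ _ (by rw [hRow i]; exact pvLM_nonneg _), hRow i,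
        pv_split_max (pvRowC M i) (pv_rowC_subset hi) hPW hComp]
      have : (pvRowC M i).filter (fun c => decide (pvVal M c ∉ (v :: S'))) =
          (pvRowC M i).filter (fun c => decide (pvVal M c < v)) :=
        List.filter_congr (fun c' hc' => pv_pred_lt hPW hComp (pv_rowC_subset hi c' hc'))
      rw [this]
    · have hfilter : (pvLocs M v).filter (fun c => c.1 == i) = [] := by
        rw [List.filter_eq_nil_iff]
        intro c hc
        have := (pv_mem_cells.mp (hsub c hc)).1
        simp only [beq_iff_eq]
        omega
      rw [hfilter]
      show row.getD i 0 = _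
      rw [hRow i, pv_row_zero hi, pv_row_zero hi]
  · intro j
    rw [hP2c j, hmap]
    by_cases hj : j < pvN M
    · have hfilter : (pvLocs M v).filter (fun c => c.2 == j) =
          (pvColC M j).filter (fun c => pvVal M c == v) := by
        rw [pvLocs, List.filter_filter, ← pv_cells_filter_col M (fun c => pvVal M c == v) j hj]
      rw [hfilter, pv_foldl_max_eq _ _ (by rw [hCol j]; exact pvLM_nonneg _), hCol j,
        pv_split_max (pvColC M j) (pv_colC_subset hj) hPW hComp]
      have : (pvColC M j).filter (fun c => decide (pvVal M c ∉ (v :: S'))) =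
          (pvColC M j).filter (fun c => decide (pvVal M c < v)) :=
        List.filter_congr (fun c' hc' => pv_pred_lt hPW hComp (pv_colC_subset hj c' hc'))
      rw [this]
    · have hfilter : (pvLocs M v).filter (fun c => c.2 == j) = [] := by
        rw [List.filter_eq_nil_iff]
        intro c hc
        have := (pv_mem_cells.mp (hsub c hc)).2
        simp only [beq_iff_eq]
        omega
      rw [hfilter]
      show col.getD j 0 = _
      rw [hCol j, pv_col_zero hj, pv_col_zero hj]

theorem pv_A_inv (M : List (List Int)) : ∀ (S : List Int) (row col : List Int) (dp : List (List Int)),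
    S.Pairwise (· < ·) →
    (∀ c ∈ pvCells M, pvVal M c ∉ S → ∀ w ∈ S, pvVal M c < w) →
    row.length = M.length → col.length = pvN M → dp.length = M.length →
    (∀ r ∈ dp, r.length = pvN M) →
    pvRInv M S row → pvCInv M S col →
    (∀ i, (S.foldl (pvAstep M) (row, col, dp)).1.getD i 0 = pvLM ((pvRowC M i).map (pvF M))) ∧
    (S.foldl (pvAstep M) (row, col, dp)).1.length = M.length := by
  intro S
  induction S with
  | nil =>
    intro row col dp _ _ hrl _ _ _ hRow _
    refine ⟨fun i => ?_, hrl⟩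
    rw [List.foldl_nil]
    show row.getD i 0 = _
    rw [hRow i, List.filter_eq_self.mpr (by intro c _; simp)]
  | cons v S' ih =>
    intro row col dp hPW hComp hrl hcl hdl hdr hRow hCol
    rw [List.foldl_cons]
    have hstep := pv_Astep M v S' row col dp hPW hComp hrl hcl hdl hdr hRow hCol
    have hComp' : ∀ c ∈ pvCells M, pvVal M c ∉ S' → ∀ w ∈ S', pvVal M c < w := by
      intro c hc hnm w hw
      by_cases hcv : pvVal M c = v
      · exact hcv ▸ (List.pairwise_cons.mp hPW).1 w hw
      · exact hComp c hc (by simp [hcv, hnm]) w (by simp [hw])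
    exact ih (pvAstep M (row, col, dp) v).1 (pvAstep M (row, col, dp) v).2.1
      (pvAstep M (row, col, dp) v).2.2 (List.pairwise_cons.mp hPW).2 hComp'
      hstep.2.2.1 hstep.2.2.2.1 hstep.2.2.2.2.1 hstep.2.2.2.2.2 hstep.1 hstep.2.1

theorem pv_A_val (M : List (List Int)) :
    maxIncreasingCells M = pvLM ((pvCells M).map (pvF M)) := by
  simp only [maxIncreasingCells]
  rw [show ((M.getD 0 []).length) = pvN M from rfl]
  rw [pv_dict_flat M, pv_dict_keys M]
  simp only [pv_dict_getD M]
  show (PySem.List.max?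
    ((PySem.List.sorted (PySem.Set.ofList ((pvCells M).map (pvVal M))) (fun v => v) false).foldl
      (pvAstep M)
      (List.replicate M.length 0, List.replicate (pvN M) 0,
        List.replicate M.length (List.replicate (pvN M) 0))).1 (fun x => x)).getD 0
    = pvLM ((pvCells M).map (pvF M))
  have hmemS : ∀ c ∈ pvCells M,
      pvVal M c ∈ PySem.List.sorted (PySem.Set.ofList ((pvCells M).map (pvVal M))) (fun v => v) false := by
    intro c hc
    rw [PySem.List.mem_sorted]
    exact (PySem.Set.mem_ofList _ _).mpr (List.mem_map.mpr ⟨c, hc, rfl⟩)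
  have hinv := pv_A_inv M
    (PySem.List.sorted (PySem.Set.ofList ((pvCells M).map (pvVal M))) (fun v => v) false)
    (List.replicate M.length 0) (List.replicate (pvN M) 0)
    (List.replicate M.length (List.replicate (pvN M) 0))
    (PySem.List.sorted_ofList_pairwise_lt ((pvCells M).map (pvVal M)))
    (by intro c hc hnm _ _; exact absurd (hmemS c hc) hnm)
    (by simp) (by simp) (by simp)
    (by intro r hr; rw [List.eq_of_mem_replicate hr]; simp)
    (by
      intro i
      rw [pv_getD_replicate]
      by_cases hi : i < M.length
      · rw [List.filter_eq_nil_iff.mpr (by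
          intro c hc
          simpa using hmemS c (pv_rowC_subset hi c hc))]
        rfl
      · exact (pv_row_zero hi _).symm)
    (by
      intro j
      rw [pv_getD_replicate]
      by_cases hj : j < pvN M
      · rw [List.filter_eq_nil_iff.mpr (by
          intro c hc
          simpa using hmemS c (pv_colC_subset hj c hc))]
        rfl
      · exact (pv_col_zero hj _).symm)
  obtain ⟨hgetD, hlen⟩ := hinv
  have hrowlist : ((PySem.List.sorted (PySem.Set.ofList ((pvCells M).map (pvVal M))) (fun v => v) false).foldl
      (pvAstep M)
      (List.replicate M.length 0, List.replicate (pvN M) 0,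
        List.replicate M.length (List.replicate (pvN M) 0))).1
      = (List.range M.length).map (fun i => pvLM ((pvRowC M i).map (pvF M))) := by
    apply List.ext_getElem (by simp [hlen])
    intro k h1 h2
    rw [← List.getD_eq_getElem _ 0 h1, hgetD k]
    simp
  rw [hrowlist, pv_maxD_eq_pvLM _ (by
    intro x hx
    obtain ⟨i, _, hix⟩ := List.mem_map.mp hx
    rw [← hix]
    exact pvLM_nonneg _)]
  rw [show (pvCells M).map (pvF M) = (List.range M.length).flatMap (fun i => (pvRowC M i).map (pvF M)) from by
    rw [pvCells, List.map_flatMap]]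
  rw [pvLM_flatMap]

-- B's per-cell step
def pvBstep (M : List (List Int)) (f : PySem.Dict (Nat × Nat) Int) (t : Int × Nat × Nat) :
    PySem.Dict (Nat × Nat) Int :=
  let v := t.1; let i := t.2.1; let j := t.2.2
  let best := (List.range (pvN M)).foldl (fun best jj =>
    if (M.getD i []).getD jj 0 < v then max best (f.getD (i, jj) 0) else best) 0
  let best := (List.range M.length).foldl (fun best ii =>
    if (M.getD ii []).getD j 0 < v then max best (f.getD (ii, j) 0) else best) best
  f.insert (i, j) (best + 1)

theorem pv_B_best (M : List (List Int)) (d : PySem.Dict (Nat × Nat) Int) (t : Int × Nat × Nat)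
    (ht1 : t.1 = pvVal M t.2) (ht2 : t.2 ∈ pvCells M)
    (hsmall : ∀ c ∈ pvCells M, pvVal M c < t.1 → d.getD c 0 = pvF M c) :
    ((List.range M.length).foldl (fun best ii =>
        if (M.getD ii []).getD t.2.2 0 < t.1 then max best (d.getD (ii, t.2.2) 0) else best)
      ((List.range (pvN M)).foldl (fun best jj =>
        if (M.getD t.2.1 []).getD jj 0 < t.1 then max best (d.getD (t.2.1, jj) 0) else best) 0)) + 1
    = pvF M t.2 := by
  have hiM := (pv_mem_cells.mp ht2).1
  have hjN := (pv_mem_cells.mp ht2).2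
  have hrow : (List.range (pvN M)).foldl (fun best jj =>
      if (M.getD t.2.1 []).getD jj 0 < t.1 then max best (d.getD (t.2.1, jj) 0) else best) 0
      = pvLM (((pvRowC M t.2.1).filter (fun c => decide (pvVal M c < t.1))).map (pvF M)) := by
    rw [PySem.List.foldl_congr_mem _ _ (fun best jj =>
        if (M.getD t.2.1 []).getD jj 0 < t.1 then max best (pvF M (t.2.1, jj)) else best) _ ?_]
    · rw [pv_foldl_ifmax_p (List.range (pvN M))
        (fun jj => (M.getD t.2.1 []).getD jj 0 < t.1) (fun jj => pvF M (t.2.1, jj)) 0]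
      rw [pvRowC, pv_filter_map, List.map_map]
      rfl
    · intro acc jj hjj
      show (if (M.getD t.2.1 []).getD jj 0 < t.1 then max acc (d.getD (t.2.1, jj) 0) else acc)
        = (if (M.getD t.2.1 []).getD jj 0 < t.1 then max acc (pvF M (t.2.1, jj)) else acc)
      by_cases h : (M.getD t.2.1 []).getD jj 0 < t.1
      · rw [if_pos h, if_pos h,
          hsmall (t.2.1, jj) (pv_mem_cells.mpr ⟨hiM, List.mem_range.mp hjj⟩) h]
      · rw [if_neg h, if_neg h]
  have hcol : ∀ b : Int, 0 ≤ b → (List.range M.length).foldl (fun best ii =>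
      if (M.getD ii []).getD t.2.2 0 < t.1 then max best (d.getD (ii, t.2.2) 0) else best) b
      = max b (pvLM (((pvColC M t.2.2).filter (fun c => decide (pvVal M c < t.1))).map (pvF M))) := by
    intro b hb
    rw [PySem.List.foldl_congr_mem _ _ (fun best ii =>
        if (M.getD ii []).getD t.2.2 0 < t.1 then max best (pvF M (ii, t.2.2)) else best) _ ?_]
    · rw [pv_foldl_ifmax_p (List.range M.length)
        (fun ii => (M.getD ii []).getD t.2.2 0 < t.1) (fun ii => pvF M (ii, t.2.2)) b]
      rw [show (((List.range M.length).filter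
          (fun ii => decide ((M.getD ii []).getD t.2.2 0 < t.1))).map (fun ii => pvF M (ii, t.2.2)))
          = (((pvColC M t.2.2).filter (fun c => decide (pvVal M c < t.1))).map (pvF M)) from by
        rw [pvColC, pv_filter_map, List.map_map]
        rfl]
      exact pv_foldl_max_eq _ _ hb
    · intro acc ii hii
      show (if (M.getD ii []).getD t.2.2 0 < t.1 then max acc (d.getD (ii, t.2.2) 0) else acc)
        = (if (M.getD ii []).getD t.2.2 0 < t.1 then max acc (pvF M (ii, t.2.2)) else acc)
      by_cases h : (M.getD ii []).getD t.2.2 0 < t.1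
      · rw [if_pos h, if_pos h,
          hsmall (ii, t.2.2) (pv_mem_cells.mpr ⟨List.mem_range.mp hii, hjN⟩) h]
      · rw [if_neg h, if_neg h]
  rw [hrow, hcol _ (pvLM_nonneg _), pvF_eq ht2, ← ht1]
  omega

theorem pv_B_inv (M : List (List Int)) :
    ∀ (todo : List (Int × Nat × Nat)) (done : List (Nat × Nat)) (d : PySem.Dict (Nat × Nat) Int),
    (∀ t ∈ todo, t.1 = pvVal M t.2 ∧ t.2 ∈ pvCells M) →
    todo.Pairwise (fun a b => a.1 ≤ b.1) →
    (done ++ todo.map (fun t => t.2)).Perm (pvCells M) →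
    (∀ c, d.get? c = if c ∈ done then some (pvF M c) else none) →
    d.values = done.map (pvF M) →
    (todo.foldl (pvBstep M) d).values = (done ++ todo.map (fun t => t.2)).map (pvF M) := by
  intro todo
  induction todo with
  | nil => intro done d _ _ _ _ hv; simpa using hv
  | cons t rest ih =>
    intro done d H1 H2 H3 Hd Hv
    obtain ⟨ht1, ht2⟩ := H1 t (by simp)
    have hnodup : (done ++ (t :: rest).map (fun t => t.2)).Nodup :=
      (H3.nodup_iff).mpr (pv_cells_nodup M)
    have hc0done : t.2 ∉ done := by
      intro h
      exact (List.disjoint_of_nodup_append hnodup) h (by simp)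
    have hdone_small : ∀ c ∈ pvCells M, pvVal M c < t.1 → c ∈ done := by
      intro c hc hlt
      rcases List.mem_append.mp ((H3.mem_iff).mpr hc) with h | h
      · exact h
      · exfalso
        rcases List.mem_map.mp h with ⟨t', ht', htc⟩
        rcases List.mem_cons.mp ht' with h1 | h1
        · rw [← htc, h1, ← ht1] at hlt
          exact lt_irrefl _ hlt
        · have hle : t.1 ≤ t'.1 := (List.pairwise_cons.mp H2).1 t' h1
          have hv' := (H1 t' (by simp [h1])).1
          rw [← htc, ← hv'] at hlt
          omega
    have hsmall : ∀ c ∈ pvCells M, pvVal M c < t.1 → d.getD c 0 = pvF M c := by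
      intro c hc hlt
      rw [PySem.Dict.getD_eq_get?_getD, Hd c, if_pos (hdone_small c hc hlt)]
      rfl
    have hbest := pv_B_best M d t ht1 ht2 hsmall
    have hstep_eq : pvBstep M d t = d.insert t.2 (pvF M t.2) := by
      show d.insert (t.2.1, t.2.2) (_ + 1) = d.insert t.2 (pvF M t.2)
      rw [hbest]
    have hcont : d.contains t.2 = false := by
      rw [PySem.Dict.contains_eq_isSome_get?, Hd t.2, if_neg hc0done]
      rfl
    have hvalues' : (d.insert t.2 (pvF M t.2)).values = (done ++ [t.2]).map (pvF M) := by
      simp only [PySem.Dict.values, PySem.Dict.items_insert_of_not_contains d (pvF M t.2) hcont,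
        List.map_append]
      rw [show d.items.map (fun x => x.2) = d.values from rfl, Hv]
      simp
    have hget' : ∀ c, (d.insert t.2 (pvF M t.2)).get? c =
        if c ∈ done ++ [t.2] then some (pvF M c) else none := by
      intro c
      rw [PySem.Dict.get?_insert]
      by_cases hc : c = t.2
      · subst hc
        simp
      · rw [if_neg hc, Hd c]
        have heq : (c ∈ done ++ [t.2]) ↔ (c ∈ done) := by simp [hc]
        by_cases hcd : c ∈ done
        · rw [if_pos hcd, if_pos (heq.mpr hcd)]
        · rw [if_neg hcd, if_neg (fun hx => hcd (heq.mp hx))]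
    rw [List.foldl_cons, hstep_eq]
    have hres := ih (done ++ [t.2]) (d.insert t.2 (pvF M t.2))
      (fun t' ht' => H1 t' (by simp [ht']))
      (List.pairwise_cons.mp H2).2
      (by
        have : (done ++ [t.2]) ++ rest.map (fun t => t.2) = done ++ (t :: rest).map (fun t => t.2) := by
          simp
        rw [this]
        exact H3)
      hget' hvalues'
    rw [hres]
    congr 1
    rw [List.append_assoc]
    rfl

theorem pv_B_val (M : List (List Int)) :
    maxIncreasingCells_alt M = pvLM ((pvCells M).map (pvF M)) := by
  simp only [maxIncreasingCells_alt]
  rw [show ((M.getD 0 []).length) = pvN M from rfl]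
  rw [show (List.range M.length).flatMap
      (fun i => (List.range (pvN M)).map (fun j => (((M.getD i []).getD j 0 : Int), i, j)))
      = (pvCells M).map (fun c => (pvVal M c, c)) from by
    simp only [pvCells, pvRowC, List.map_flatMap, List.map_map]
    rfl]
  show (PySem.List.max?
    ((PySem.List.sorted ((pvCells M).map (fun c => (pvVal M c, c))) (fun t => t.1) false).foldl
      (pvBstep M) PySem.Dict.empty).values (fun x => x)).getD 0
    = pvLM ((pvCells M).map (pvF M))
  have hperm := PySem.List.sorted_perm ((pvCells M).map (fun c => (pvVal M c, c))) (fun t => t.1) false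
  have hmapperm : ((PySem.List.sorted ((pvCells M).map (fun c => (pvVal M c, c))) (fun t => t.1) false).map
      (fun t : Int × Nat × Nat => t.2)).Perm (pvCells M) := by
    refine (hperm.map (fun t : Int × Nat × Nat => t.2)).trans ?_
    rw [List.map_map,
      show ((fun t : Int × Nat × Nat => t.2) ∘ (fun c : Nat × Nat => (pvVal M c, c))) = id from rfl,
      List.map_id]
  have hres := pv_B_inv M
    (PySem.List.sorted ((pvCells M).map (fun c => (pvVal M c, c))) (fun t => t.1) false)
    [] PySem.Dict.empty
    (by
      intro t ht
      obtain ⟨c, hc, htc⟩ := List.mem_map.mp ((PySem.List.mem_sorted _ _ _ _).mp ht)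
      rw [← htc]
      exact ⟨rfl, hc⟩)
    (PySem.List.sorted_pairwise _ _)
    (by simpa using hmapperm)
    (by intro c; simp [PySem.Dict.get?_empty])
    (by rfl)
  rw [hres, pv_maxD_eq_pvLM _ (by
    intro x hx
    obtain ⟨c, _, hcx⟩ := List.mem_map.mp hx
    rw [← hcx]
    exact pvF_nonneg M c)]
  apply pvLM_perm
  simpa using hmapperm.map (pvF M)

-- ===== VERDICT (by name: the statement is the Claim_ definition above) =====
theorem maxIncreasingCells_spec : Claim_equal_maxIncreasingCells := by
  intro M _ _
  unfold Spec_maxIncreasingCells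
  rw [pv_A_val, pv_B_val]
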